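-- pv_equiv track=rewrite | github.com/DavidAle11/Ciencia_de_datos_CIDE | Intro Ciencia de datos/Análisis de tweets/Análisis tweets.py | find_min_count_entities
-- ===== SOURCE A (Python) =====
-- def count_tokens(token_list):
--     """
--     ** Determina las frecuencias de los tokens
--
--     Parámetros: token_list (lista): lista que contiene los tokens en cadena
--     Returns: diccionario (diccionario): regresa en clave los tokens y en valor la frecuencia de estos
--     """
--     diccionario = {} # se inicializa el diccionario de frecuencias
--
--     for token in token_list: # se itera por la lista
--         if token in diccionario: # se verifica si el token ya esta en el diccinario
--             diccionario[token] += 1 # si ya esta, la frecuencia aumenta en 1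
--         else: # si no esta
--             diccionario[token] = 1 # aparece por primera vez, entonces la frecuencia inicia en 1
--
--     return (diccionario)
--
-- def find_min_count(token_list, k):
--     """
--     ** Determina que tokens ocurren al menos k veces
--
--     Parámetros: token_list (lista): lista que contiene los tokens en cadena
--                 k (entero): hace referencia al top k
--     Returns: conjunto (conjunto): contiene a los tokens que aparecen al menos k veces
--     """
--
--     lista_frecuencias = list(count_tokens(token_list).items()) # diccionario de token y frecuencia convertido en lista
--     conjunto = set([i[0] for i in lista_frecuencias if i[1] >= k]) # se agregan a conjunto los tokens que aparecen al menos k veces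
--
--     return (conjunto)
--
-- def find_min_count_entities(tweets, entity_desc, min_count):
--     """
--     **Determina las entidades que aparecen un número mínimo de veces
--     Parámetros: tweets (lista): lista de información a analizar
--                 entity_desc (tupla): contiene la informacion de clave y subclave y booleano
--                 min_count (entero): número minimo de veces que tiene que aparecer un tweet
--     Returns: conjunto (conjunto): contiene a los tokens que aparecen al menos min_count veces
--     """
--     clave = entity_desc[0] # clave para diccionario
--     subclave = entity_desc[1] # subclave para diccionario
--     lista = [tweet['entities'][clave][0][subclave].lower() for tweet in tweets if tweet['entities'][clave]] # lista de los names de user_mention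
--     #lista1 = [dic[subclave] for tweet in tweets for dic in tweet['entities'][clave]]
--     '''
--     NOTA: En lista1 se iteran sobre todos los diccionarios que puede haber en la lista tweet['entities'][clave]
--           y no solo en en primer diccionario si es que este existiera como se hace en lista.
--           lo hicimos solo iterando sobre el primer diccionario porque nos dimos cuenta que en los
--           resultados de la tarea que ustedes proponen, coinciden si se hace como en lista.
--           Para obtener la informacion completa favor de descomentar lista 1 y colocarla en find_min_count
--     '''
--     conjunto = find_min_count(lista, min_count) # conjunto que contiene los tokens que aparecen al menos min_count veces
--
--     return (conjunto)
-- ===== SOURCE B (Python) =====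
-- def find_min_count_entities(tweets, entity_desc, min_count):
--     clave = entity_desc[0]
--     subclave = entity_desc[1]
--     lista = [tweet['entities'][clave][0][subclave].lower() for tweet in tweets if tweet['entities'][clave]]
--     conjunto = set()
--     rest = lista
--     while rest:  # peel off one distinct token per round
--         t = rest[0]
--         kept = [x for x in rest if x != t]
--         if len(rest) - len(kept) >= min_count:  # occurrences of t removed in this round
--             conjunto.add(t)
--         rest = kept
--     return conjunto
-- ===== Notes on version B (the rewrite author's own statement) =====
-- stated objective: alternative
-- what changed: B replaces A's hash-counting pipeline (build frequency dict, list its items, filter, wrap in set) by a partition-refinement loop: repeatedly take the first remaining token, filter out all its occurrences, and add it to the set when the number removed reaches min_count, so no dictionary or counting structure is ever built.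
import Mathlib
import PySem

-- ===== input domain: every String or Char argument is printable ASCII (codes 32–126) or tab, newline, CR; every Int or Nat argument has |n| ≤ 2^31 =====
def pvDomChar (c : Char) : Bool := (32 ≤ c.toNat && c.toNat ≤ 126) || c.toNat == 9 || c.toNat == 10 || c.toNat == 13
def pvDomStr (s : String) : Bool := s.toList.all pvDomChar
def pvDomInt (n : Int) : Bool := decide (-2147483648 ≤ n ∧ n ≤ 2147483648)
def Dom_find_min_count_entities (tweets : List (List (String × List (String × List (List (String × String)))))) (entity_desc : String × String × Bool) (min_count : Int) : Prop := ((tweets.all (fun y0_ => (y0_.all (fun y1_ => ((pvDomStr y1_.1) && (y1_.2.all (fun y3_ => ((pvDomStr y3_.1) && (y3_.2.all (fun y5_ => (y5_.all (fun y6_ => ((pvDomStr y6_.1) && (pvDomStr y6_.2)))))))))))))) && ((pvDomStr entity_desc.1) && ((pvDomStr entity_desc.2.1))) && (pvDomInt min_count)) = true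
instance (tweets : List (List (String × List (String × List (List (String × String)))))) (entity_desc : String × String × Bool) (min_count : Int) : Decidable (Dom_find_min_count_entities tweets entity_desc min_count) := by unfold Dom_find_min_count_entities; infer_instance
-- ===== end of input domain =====

-- B replaces A's counting-dict pipeline by a partition-refinement loop (peel one distinct token per
-- round, keep it if enough occurrences were removed); objective: alternative. Neither Python mutates
-- its arguments.

-- ===== PORT A =====
-- helper: the extraction comprehension shared verbatim by both Pythons
-- [tweet['entities'][clave][0][subclave].lower() for tweet in tweets if tweet['entities'][clave]]
def pvExtract (tweets : List (List (String × List (String × List (List (String × String)))))) (clave subclave : String) : List String :=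
  (tweets.filter (fun tweet =>
      !(((PySem.Dict.mk ((PySem.Dict.mk tweet).getD "entities" [])).getD clave []).isEmpty))).map
    (fun tweet =>
      PySem.Str.lower ((PySem.Dict.mk (((PySem.Dict.mk ((PySem.Dict.mk tweet).getD "entities" [])).getD clave []).headD [])).getD subclave ""))

def count_tokens (token_list : List String) : PySem.Dict String Int :=
  token_list.foldl (fun diccionario token =>
    if diccionario.contains token then diccionario.insert token (diccionario.getD token 0 + 1)
    else diccionario.insert token 1) PySem.Dict.empty

def find_min_count (token_list : List String) (k : Int) : List String :=
  let lista_frecuencias := (count_tokens token_list).items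
  PySem.Set.ofList ((lista_frecuencias.filter (fun i => decide (k ≤ i.2))).map (fun i => i.1))

def find_min_count_entities (tweets : List (List (String × List (String × List (List (String × String)))))) (entity_desc : String × String × Bool) (min_count : Int) : List String :=
  let clave := entity_desc.1
  let subclave := entity_desc.2.1
  let lista := pvExtract tweets clave subclave
  find_min_count lista min_count

-- ===== PORT B =====
-- the while loop of Source B: peel the first remaining token, drop all its occurrences,
-- add it to the set when (len(rest) - len(kept)) >= min_count
def pvPartLoop (conjunto : PySem.Set String) (rest : List String) (k : Int) : PySem.Set String :=
  match rest with
  | [] => conjunto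
  | t :: rs =>
    let kept := (t :: rs).filter (fun x => x != t)
    let conjunto' := if k ≤ ((t :: rs).length : Int) - (kept.length : Int)
      then PySem.Set.add conjunto t else conjunto
    pvPartLoop conjunto' kept k
termination_by rest.length
decreasing_by
  simp only [List.filter_cons, bne_self_eq_false, List.length_cons]
  exact Nat.lt_succ_of_le (List.length_filter_le _ _)

def find_min_count_entities_alt (tweets : List (List (String × List (String × List (List (String × String)))))) (entity_desc : String × String × Bool) (min_count : Int) : List String :=
  let clave := entity_desc.1
  let subclave := entity_desc.2.1
  let lista := pvExtract tweets clave subclave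
  pvPartLoop PySem.Set.empty lista min_count

-- ===== PRECONDITION & SPEC =====
-- Pre_ excludes exactly the inputs on which the Python A raises KeyError: a tweet without the
-- 'entities' key, an entities dict without the clave key, or a nonempty clave list whose first
-- dict lacks the subclave key.
def pvTweetOk (clave subclave : String) (tweet : List (String × List (String × List (List (String × String))))) : Bool :=
  ((PySem.Dict.mk tweet).get? "entities").isSome &&
  (let ents := PySem.Dict.mk (((PySem.Dict.mk tweet).get? "entities").getD []);
   (ents.get? clave).isSome &&
   (match (ents.get? clave).getD [] with
    | [] => true
    | d0 :: _ => ((PySem.Dict.mk d0).get? subclave).isSome))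

def Pre_find_min_count_entities (tweets : List (List (String × List (String × List (List (String × String)))))) (entity_desc : String × String × Bool) (min_count : Int) : Prop :=
  tweets.all (pvTweetOk entity_desc.1 entity_desc.2.1) = true

instance (tweets : List (List (String × List (String × List (List (String × String)))))) (entity_desc : String × String × Bool) (min_count : Int) : Decidable (Pre_find_min_count_entities tweets entity_desc min_count) := by unfold Pre_find_min_count_entities; infer_instance

def pvWitness_find_min_count_entities : (List (List (String × List (String × List (List (String × String)))))) × (String × String × Bool) × Int :=
  ([[("entities", [("k", [[("s", "A")]])])], [("entities", [("k", [])])]], ("k", "s", true), 1)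

def Spec_find_min_count_entities (tweets : List (List (String × List (String × List (List (String × String)))))) (entity_desc : String × String × Bool) (min_count : Int) (out : List String) : Prop := out = find_min_count_entities_alt tweets entity_desc min_count
instance (tweets : List (List (String × List (String × List (List (String × String)))))) (entity_desc : String × String × Bool) (min_count : Int) (out : List String) : Decidable (Spec_find_min_count_entities tweets entity_desc min_count out) := by unfold Spec_find_min_count_entities; infer_instance

-- ===== CLAIM (what is proved, stated in full; the proofs are below) =====
def Claim_equal_find_min_count_entities : Prop := ∀ (tweets : List (List (String × List (String × List (List (String × String)))))) (entity_desc : String × String × Bool) (min_count : Int), Dom_find_min_count_entities tweets entity_desc min_count → Pre_find_min_count_entities tweets entity_desc min_count → Spec_find_min_count_entities tweets entity_desc min_count (find_min_count_entities tweets entity_desc min_count)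

-- ===== LEMMAS AND PROOFS =====

-- A's branching counting step is the unconditional counter step
theorem pvStep_eq (d : PySem.Dict String Int) (token : String) :
    (if d.contains token then d.insert token (d.getD token 0 + 1) else d.insert token 1)
      = d.insert token (d.getD token 0 + 1) := by
  by_cases h : d.contains token = true
  · simp [h]
  · simp [h, PySem.Dict.getD_of_not_contains d 0 (by simpa using h)]

theorem pvCount_tokens_eq (token_list : List String) :
    count_tokens token_list = PySem.Dict.counter token_list := by
  unfold count_tokens
  have hfun : (fun (d : PySem.Dict String Int) token =>
      if d.contains token then d.insert token (d.getD token 0 + 1) else d.insert token 1)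
      = (fun (d : PySem.Dict String Int) token => d.insert token (d.getD token 0 + 1)) := by
    funext d token; exact pvStep_eq d token
  rw [hfun, PySem.Dict.foldl_insert_getD_add_one_eq_counter]

-- A's result in closed form: the deduplicated token list filtered by total count
theorem pvA_closed (lista : List String) (k : Int) :
    find_min_count lista k
      = (PySem.Set.ofList lista).filter (fun t => decide (k ≤ (lista.count t : Int))) := by
  unfold find_min_count
  rw [pvCount_tokens_eq, PySem.Dict.items_counter]
  simp only []
  rw [List.filter_map, List.map_map]
  rw [show ((fun i : String × Int => i.1) ∘ fun t : String => (t, (lista.count t : Int))) = (fun t => t) from rfl,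
    List.map_id']
  rw [show ((fun i : String × Int => decide (k ≤ i.2)) ∘ fun t : String => (t, (lista.count t : Int)))
      = (fun t : String => decide (k ≤ (lista.count t : Int))) from rfl]
  exact PySem.Set.ofList_eq_self_of_nodup _
    ((PySem.Set.nodup_ofList lista).filter _)

-- set(xs filtered by an element-only predicate) is set(xs) filtered by it
theorem pvOfList_filter {α : Type} [BEq α] [LawfulBEq α] (p : α → Bool) (xs : List α) :
    PySem.Set.ofList (xs.filter p) = (PySem.Set.ofList xs).filter p := by
  induction xs with
  | nil => rfl
  | cons x xs ih =>
    by_cases hp : p x = true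
    · simp only [List.filter_cons, hp, if_pos, PySem.Set.ofList_cons, ih]
      simp only [PySem.Set.discard, List.filter_filter]
      congr 1
      apply List.filter_congr
      intro y _
      exact Bool.and_comm _ _
    · simp only [List.filter_cons, hp, PySem.Set.ofList_cons, ih, if_neg, Bool.false_eq_true,
        not_false_iff]
      simp only [PySem.Set.discard, List.filter_filter]
      apply List.filter_congr
      intro y _
      by_cases hyx : y = x <;> simp [hyx, hp]

-- B's loop in closed form: it appends to the accumulated set exactly the deduplicated
-- tokens of rest whose count in rest reaches k (fuel induction on the length of rest)
theorem pvPartLoop_closed_aux (k : Int) (n : Nat) : ∀ (rest : List String), rest.length ≤ n →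
    ∀ (s : PySem.Set String), pvPartLoop s rest k
      = PySem.Set.update s
          ((PySem.Set.ofList rest).filter (fun t => decide (k ≤ (rest.count t : Int)))) := by
  induction n with
  | zero =>
    intro rest h s
    have : rest = [] := List.eq_nil_of_length_eq_zero (Nat.le_zero.mp h)
    subst this
    simp [pvPartLoop, PySem.Set.update_nil]
  | succ n ih =>
    intro rest h s
    match rest with
    | [] => simp [pvPartLoop, PySem.Set.update_nil]
    | t :: rs =>
      rw [pvPartLoop]
      have hkept : (t :: rs).filter (fun x => x != t) = rs.filter (fun x => x != t) := by
        simp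
      rw [hkept]
      have hlen : (rs.filter (fun x => x != t)).length ≤ n :=
        le_trans (List.length_filter_le _ _)
          (Nat.lt_succ_iff.mp (lt_of_lt_of_le (by simp) h))
      -- the number of elements removed in this round is the count of t
      have hcnt : ((t :: rs).length : Int) - (((rs.filter (fun x => x != t)).length : Int))
          = ((t :: rs).count t : Int) := by
        have h2 := List.length_eq_length_filter_add (l := t :: rs) (fun x => x != t)
        have h3 : (t :: rs).count t = ((t :: rs).filter (fun x => !(x != t))).length := by
          rw [← List.countP_eq_length_filter, List.count]
          apply List.countP_congr
          intro a _
          simp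
        rw [hkept] at h2
        omega
      -- the kept list, deduplicated, is exactly the tail of ofList (t :: rs)
      have hset : PySem.Set.ofList (rs.filter (fun x => x != t))
          = (PySem.Set.ofList rs).discard t := by
        rw [pvOfList_filter]; rfl
      -- on the kept tokens, counts in kept agree with counts in t :: rs
      have htail : ((PySem.Set.ofList rs).discard t).filter
            (fun x => decide (k ≤ ((rs.filter (fun y => y != t)).count x : Int)))
          = ((PySem.Set.ofList rs).discard t).filter
            (fun x => decide (k ≤ ((t :: rs).count x : Int))) := by
        apply List.filter_congr
        intro x hx
        have hxt : x ≠ t := ((PySem.Set.mem_discard _ _ _).mp hx).2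
        have hc1 : (rs.filter (fun y => y != t)).count x = rs.count x :=
          List.count_filter (by simpa using hxt)
        have hc2 : (t :: rs).count x = rs.count x := by
          simp [Ne.symm hxt]
        rw [hc1, hc2]
      rw [ih _ hlen, hset, htail]
      rw [show (PySem.Set.ofList (t :: rs)).filter (fun x => decide (k ≤ ((t :: rs).count x : Int)))
          = (if k ≤ ((t :: rs).count t : Int)
             then t :: ((PySem.Set.ofList rs).discard t).filter (fun x => decide (k ≤ ((t :: rs).count x : Int)))
             else ((PySem.Set.ofList rs).discard t).filter (fun x => decide (k ≤ ((t :: rs).count x : Int))))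
        from by rw [PySem.Set.ofList_cons, List.filter_cons]; split_ifs with hc <;> simp_all <;> omega]
      rw [hcnt]
      split_ifs with hc
      · rw [PySem.Set.update_cons]
      · rfl

theorem pvPartLoop_closed (k : Int) (rest : List String) (s : PySem.Set String) :
    pvPartLoop s rest k
      = PySem.Set.update s
          ((PySem.Set.ofList rest).filter (fun t => decide (k ≤ (rest.count t : Int)))) :=
  pvPartLoop_closed_aux k rest.length rest le_rfl s

-- ===== VERDICT (by name: the statement is the Claim_ definition above) =====
theorem find_min_count_entities_spec : Claim_equal_find_min_count_entities := by
  intro tweets entity_desc min_count _ _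
  unfold Spec_find_min_count_entities find_min_count_entities find_min_count_entities_alt
  dsimp only
  rw [pvA_closed, pvPartLoop_closed, PySem.Set.update_empty]
  exact (PySem.Set.ofList_eq_self_of_nodup _
    ((PySem.Set.nodup_ofList _).filter _)).symm
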